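-- pv_equiv track=rewrite | github.com/terror/arrg | src/arrg/parser.py | _group_args_by_command
-- ===== SOURCE A (Python) =====
-- import typing as t
-- from collections import defaultdict
--
-- def _group_args_by_command(
--   args: t.Sequence[str], command_choices: t.Iterable[str]
-- ) -> t.Dict[t.Optional[str], t.List[str]]:
--   """Group arguments by command name."""
--   result = defaultdict(list)
--   current_cmd = None
--
--   for arg in args:
--     if arg in command_choices:
--       # This is a new command
--       current_cmd = arg
--       # Important: Create empty entry for the command to ensure it's included
--       # even if it has no arguments (prevents the bug with empty subcommands)
--       result[current_cmd] = []
--     elif current_cmd is None: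
--       # This is a top-level arg
--       result[None].append(arg)
--     else:
--       # This is an arg for the current command
--       result[current_cmd].append(arg)
--
--   return result
-- ===== SOURCE B (Python) =====
-- import typing as t
-- from collections import defaultdict
--
--
-- def _group_args_by_command(
--   args: t.Sequence[str], command_choices: t.Iterable[str]
-- ) -> t.Dict[t.Optional[str], t.List[str]]:
--   """Group arguments by command name: scan to each next command and assign whole slices."""
--   args = list(args)
--   result = defaultdict(list)
--   i = 0
--   while i < len(args) and args[i] not in command_choices:
--     i += 1
--   if i > 0:
--     result[None] = args[:i]
--   while i < len(args):
--     cmd = args[i]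
--     j = i + 1
--     while j < len(args) and args[j] not in command_choices:
--       j += 1
--     result[cmd] = args[i + 1:j]
--     i = j
--   return result
-- ===== Notes on version B (the rewrite author's own statement) =====
-- stated objective: alternative
-- what changed: Replaces A's streaming fold that appends one argument at a time to the current command's list with a two-pointer scan that finds each next command and assigns the whole intervening slice at once.
import Mathlib
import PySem

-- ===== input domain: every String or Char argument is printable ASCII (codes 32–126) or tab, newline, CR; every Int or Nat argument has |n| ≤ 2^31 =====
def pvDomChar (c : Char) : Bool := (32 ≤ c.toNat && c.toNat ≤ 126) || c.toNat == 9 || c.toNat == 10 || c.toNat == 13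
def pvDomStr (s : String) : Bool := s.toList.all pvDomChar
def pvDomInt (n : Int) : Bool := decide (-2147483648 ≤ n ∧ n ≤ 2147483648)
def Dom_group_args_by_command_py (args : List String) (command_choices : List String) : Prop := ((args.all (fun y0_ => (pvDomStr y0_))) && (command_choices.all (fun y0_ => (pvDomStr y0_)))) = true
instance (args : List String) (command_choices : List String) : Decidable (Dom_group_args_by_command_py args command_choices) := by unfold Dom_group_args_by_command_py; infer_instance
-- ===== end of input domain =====

-- B replaces A's one-element-at-a-time streaming fold with a two-pointer scan that
-- assigns whole slices per command (objective: alternative decomposition, same cost).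

-- ===== PORT A =====
-- A's loop state: the result dict and current_cmd; result[k].append(x) on a
-- defaultdict(list) is insert k (getD k [] ++ [x]) (overwrite keeps position).
def pvALoop (cc : List String) :
    PySem.Dict (Option String) (List String) → Option String → List String →
    PySem.Dict (Option String) (List String)
  | d, _, [] => d
  | d, cur, a :: xs =>
    if cc.contains a then
      pvALoop cc (d.insert (some a) []) (some a) xs
    else
      match cur with
      | none => pvALoop cc (d.insert none (d.getD none [] ++ [a])) none xs
      | some c => pvALoop cc (d.insert (some c) (d.getD (some c) [] ++ [a])) (some c) xs

def group_args_by_command_py (args : List String) (command_choices : List String) :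
    List (Option String × List String) :=
  (pvALoop command_choices PySem.Dict.empty none args).items

-- ===== PORT B =====
-- B's inner "while j < len(args) and args[j] not in command_choices" scan plus the
-- slice args[i+1:j]: the scanned prefix is takeWhile, the remainder dropWhile.
def pvBLoop (cc : List String) (d : PySem.Dict (Option String) (List String)) :
    List String → PySem.Dict (Option String) (List String)
  | [] => d
  | c :: xs =>
    pvBLoop cc (d.insert (some c) (xs.takeWhile (fun a => !cc.contains a)))
      (xs.dropWhile (fun a => !cc.contains a))
termination_by xs => xs.length
decreasing_by
  simp only [List.length_cons]
  exact Nat.lt_succ_of_le (List.length_dropWhile_le _ _)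

def group_args_by_command_py_alt (args : List String) (command_choices : List String) :
    List (Option String × List String) :=
  let pre := args.takeWhile (fun a => !command_choices.contains a)
  let rest := args.dropWhile (fun a => !command_choices.contains a)
  let d0 := if pre = [] then PySem.Dict.empty else PySem.Dict.empty.insert none pre
  (pvBLoop command_choices d0 rest).items

-- ===== PRECONDITION & SPEC =====
def Spec_group_args_by_command_py (args : List String) (command_choices : List String) (out : List (Option String × List String)) : Prop := out = group_args_by_command_py_alt args command_choices
instance (args : List String) (command_choices : List String) (out : List (Option String × List String)) : Decidable (Spec_group_args_by_command_py args command_choices out) := by unfold Spec_group_args_by_command_py; infer_instance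

-- ===== CLAIM (what is proved, stated in full; the proofs are below) =====
def Claim_equal_group_args_by_command_py : Prop := ∀ (args : List String) (command_choices : List String), Dom_group_args_by_command_py args command_choices → Spec_group_args_by_command_py args command_choices (group_args_by_command_py args command_choices)

-- ===== LEMMAS AND PROOFS =====

-- A's loop, started with cur's slot freshly set to v, consumes the command-free
-- prefix by appending it to v, and then (if anything is left) meets the next command.
theorem pvALoop_phase (cc : List String) (xs : List String) :
    ∀ (d : PySem.Dict (Option String) (List String)) (cur : Option String) (v : List String),
    pvALoop cc (d.insert cur v) cur xs =
      match xs.dropWhile (fun a => !cc.contains a) with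
      | [] => d.insert cur (v ++ xs.takeWhile (fun a => !cc.contains a))
      | a :: ys =>
          pvALoop cc ((d.insert cur (v ++ xs.takeWhile (fun a => !cc.contains a))).insert (some a) [])
            (some a) ys := by
  induction xs with
  | nil => intro d cur v; simp [pvALoop]
  | cons x xs ih =>
    intro d cur v
    by_cases hx : x ∈ cc
    · simp [pvALoop, hx]
    · have hgd : (d.insert cur v).getD cur [] = v := PySem.Dict.getD_insert_self _ _ _ _
      have hii : ∀ w, (d.insert cur v).insert cur w = d.insert cur w :=
        fun w => PySem.Dict.insert_insert_self _ _ _ _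
      cases cur with
      | none =>
        simp only [pvALoop, hgd, hii]
        rw [ih d none (v ++ [x])]
        simp [hx]
      | some c =>
        simp only [pvALoop, hgd, hii]
        rw [ih d (some c) (v ++ [x])]
        simp [hx]

-- From the moment A sets a fresh command entry, the two loops agree.
theorem pvALoop_to_B (cc : List String) :
    ∀ (n : Nat) (xs : List String), xs.length ≤ n →
    ∀ (d : PySem.Dict (Option String) (List String)) (c : String),
    pvALoop cc (d.insert (some c) []) (some c) xs = pvBLoop cc d (c :: xs) := by
  intro n
  induction n with
  | zero =>
    intro xs hxs d c
    cases xs with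
    | nil => simp [pvALoop, pvBLoop]
    | cons y ys => simp at hxs
  | succ n ih =>
    intro xs hxs d c
    rw [pvALoop_phase]
    rw [pvBLoop]
    cases hdw : xs.dropWhile (fun a => !cc.contains a) with
    | nil => simp [pvBLoop]
    | cons a ys =>
      simp only [List.nil_append]
      have hlen : ys.length ≤ n := by
        have h1 : (a :: ys).length ≤ xs.length := by
          rw [← hdw]; exact List.length_dropWhile_le _ _
        simp only [List.length_cons] at h1
        omega
      rw [ih ys hlen (d.insert (some c) (xs.takeWhile (fun a => !cc.contains a))) a]

-- ===== VERDICT (by name: the statement is the Claim_ definition above) =====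
theorem group_args_by_command_py_spec : Claim_equal_group_args_by_command_py := by
  intro args cc _
  unfold Spec_group_args_by_command_py group_args_by_command_py group_args_by_command_py_alt
  cases args with
  | nil => simp [pvALoop, pvBLoop]
  | cons a xs =>
    by_cases ha : a ∈ cc
    · simp only [pvALoop]
      rw [pvALoop_to_B cc xs.length xs (le_refl _)]
      simp [ha]
    · have h0 : (PySem.Dict.empty : PySem.Dict (Option String) (List String)).getD none [] = [] :=
        PySem.Dict.getD_empty _ _
      simp only [pvALoop, h0, List.nil_append]
      rw [pvALoop_phase cc xs PySem.Dict.empty none [a]]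
      cases hdw : xs.dropWhile (fun a => !cc.contains a) with
    | nil =>
        simp only [List.contains_eq_mem] at hdw
        simp [hdw, pvBLoop, ha]
    | cons b ys =>
        simp only [hdw]
        rw [pvALoop_to_B cc ys.length ys (le_refl _)]
        simp only [List.contains_eq_mem] at hdw
        simp [pvBLoop, ha, hdw]
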